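-- pv_equiv track=rewrite | github.com/cocodrips/TopCoder | SRM 623/UniformBoard.py | count
-- ===== SOURCE A (Python) =====
-- def count(board):
--     dots = 0
--     apples = 0
--     pears = 0
--     for bo in board:
--         for b in bo:
--             if b == '.':
--                 dots += 1
--             if b == 'A':
--                 apples += 1
--             if b == 'P':
--                 pears += 1
--     return (dots, apples, pears)
-- ===== SOURCE B (Python) =====
-- def count(board):
--     # Concatenate the whole grid into one string, then let the library
--     # scan it once per target character.
--     s = "".join(board)
--     return (s.count('.'), s.count('A'), s.count('P'))
-- ===== Notes on version B (the rewrite author's own statement) =====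
-- stated objective: faster
-- what changed: Replaces A's nested per-cell loop with three if-branches and three accumulators by joining the rows into one string and making three separate library str.count scans over it.
import Mathlib
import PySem

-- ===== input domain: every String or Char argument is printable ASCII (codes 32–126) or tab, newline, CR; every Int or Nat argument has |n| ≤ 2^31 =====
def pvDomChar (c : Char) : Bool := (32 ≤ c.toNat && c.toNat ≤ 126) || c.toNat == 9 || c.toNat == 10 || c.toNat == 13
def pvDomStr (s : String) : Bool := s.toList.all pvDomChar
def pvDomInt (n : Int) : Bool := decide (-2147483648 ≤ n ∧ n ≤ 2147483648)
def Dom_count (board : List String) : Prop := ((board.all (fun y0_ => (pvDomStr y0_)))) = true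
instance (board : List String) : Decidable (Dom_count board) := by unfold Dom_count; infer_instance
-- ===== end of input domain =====

-- B joins the rows into one string and uses three library str.count scans instead of A's nested loop with three if-branches and accumulators (measurably faster in Python via the C-level scans).

-- ===== PORT A =====
def countStep (t : Int × Int × Int) (c : Char) : Int × Int × Int :=
  let t := if c = '.' then (t.1 + 1, t.2.1, t.2.2) else t
  let t := if c = 'A' then (t.1, t.2.1 + 1, t.2.2) else t
  if c = 'P' then (t.1, t.2.1, t.2.2 + 1) else t

def count (board : List String) : Int × Int × Int :=
  board.foldl (fun t bo => bo.toList.foldl countStep t) (0, 0, 0)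

-- ===== PORT B =====
def count_alt (board : List String) : Int × Int × Int :=
  let s := PySem.Str.join "" board
  ((PySem.Str.count s "." : Int), (PySem.Str.count s "A" : Int), (PySem.Str.count s "P" : Int))

-- ===== PRECONDITION & SPEC =====
def Spec_count (board : List String) (out : Int × Int × Int) : Prop := out = count_alt board
instance (board : List String) (out : Int × Int × Int) : Decidable (Spec_count board out) := by unfold Spec_count; infer_instance

-- ===== CLAIM (what is proved, stated in full; the proofs are below) =====
def Claim_equal_count : Prop := ∀ (board : List String), Dom_count board → Spec_count board (count board)

-- ===== LEMMAS AND PROOFS =====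

lemma countStep_foldl (cs : List Char) (t : Int × Int × Int) :
    cs.foldl countStep t =
      (t.1 + (cs.count '.' : Int), t.2.1 + (cs.count 'A' : Int), t.2.2 + (cs.count 'P' : Int)) := by
  induction cs generalizing t with
  | nil => simp
  | cons c cs ih =>
    simp only [List.foldl_cons, List.count_cons, ih]
    by_cases h1 : c = '.' <;> by_cases h2 : c = 'A' <;> by_cases h3 : c = 'P' <;>
      simp_all [countStep] <;> omega

lemma count_eq_counts (board : List String) :
    count board = (((board.flatMap String.toList).count '.' : Int),
                   ((board.flatMap String.toList).count 'A' : Int),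
                   ((board.flatMap String.toList).count 'P' : Int)) := by
  unfold count
  induction board using List.reverseRecOn with
  | nil => simp
  | append_singleton xs s ih =>
    rw [List.foldl_append, List.foldl_cons, List.foldl_nil, countStep_foldl, ih]
    simp [List.count_append]

-- exact value of Chars.count's worker for a single-character needle
lemma go_single (c : Char) : ∀ (fuel : Nat) (l : List Char) (acc : Nat), l.length ≤ fuel →
    PySem.Chars.count.go [c] fuel l acc = acc + l.count c := by
  intro fuel
  induction fuel with
  | zero => intro l acc h; cases l with
    | nil => simp [PySem.Chars.count.go]
    | cons x xs => simp at h
  | succ n ih =>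
    intro l acc h
    cases l with
    | nil => simp [PySem.Chars.count.go]
    | cons x xs =>
      simp only [List.length_cons] at h
      by_cases hc : c = x
      · subst hc
        rw [PySem.Chars.count.go, if_pos (by simp [List.isPrefixOf])]
        simp only [List.length_cons, List.length_nil, List.drop_succ_cons, List.drop_zero]
        rw [ih xs (acc + 1) (by omega)]
        simp
        omega
      · rw [PySem.Chars.count.go, if_neg (by simp [List.isPrefixOf]; exact hc)]
        rw [ih xs acc (by omega)]
        simp [Ne.symm hc]

lemma str_count_single (s : String) (c : Char) :
    PySem.Str.count s (String.ofList [c]) = s.toList.count c := by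
  simp [PySem.Str.count_eq, PySem.Chars.count]
  have := go_single c s.toList.length s.toList 0 le_rfl
  simpa using this

lemma intercalate_nil_sep (ls : List (List Char)) : ([] : List Char).intercalate ls = ls.flatten := by
  induction ls with
  | nil => rfl
  | cons a t ih =>
    cases t with
    | nil => simp [List.intercalate, List.intersperse]
    | cons b t' =>
      rw [show ([] : List Char).intercalate (a :: b :: t') = a ++ [].intercalate (b :: t') from by
            simp [List.intercalate, List.intersperse], ih]
      simp

lemma join_empty_toList (board : List String) :
    (PySem.Str.join "" board).toList = board.flatMap String.toList := by
  simp [PySem.Str.toList_join, PySem.Chars.join, intercalate_nil_sep, List.flatMap]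

theorem count_spec_aux (board : List String) : count board = count_alt board := by
  rw [count_eq_counts]
  simp only [count_alt]
  rw [show ("." : String) = String.ofList ['.'] from rfl,
      show ("A" : String) = String.ofList ['A'] from rfl,
      show ("P" : String) = String.ofList ['P'] from rfl]
  simp only [str_count_single, join_empty_toList]

-- ===== VERDICT (by name: the statement is the Claim_ definition above) =====
theorem count_spec : Claim_equal_count := by
  intro board _
  exact count_spec_aux board
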